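-- pv_equiv track=rewrite | github.com/Abnerla/AI_Paper | modules/report_importer.py | _iter_lines_with_offsets
-- ===== SOURCE A (Python) =====
-- def _iter_lines_with_offsets(content: str):
--     start = 0
--     for index, char in enumerate(content):
--         if char != '\n':
--             continue
--         yield content[start:index], start, index
--         start = index + 1
--     yield content[start:], start, len(content)
-- ===== SOURCE B (Python) =====
-- def _iter_lines_with_offsets(content: str):
--     start = 0
--     for part in content.split('\n'):
--         end = start + len(part)
--         yield part, start, end
--         start = end + 1
-- ===== Notes on version B (the rewrite author's own statement) =====
-- stated objective: faster
-- what changed: B splits the content on the newline separator once (str.split) and derives each line's start/end offsets arithmetically from the parts' lengths, instead of enumerating every character in Python-level code and slicing at each newline.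
import Mathlib
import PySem

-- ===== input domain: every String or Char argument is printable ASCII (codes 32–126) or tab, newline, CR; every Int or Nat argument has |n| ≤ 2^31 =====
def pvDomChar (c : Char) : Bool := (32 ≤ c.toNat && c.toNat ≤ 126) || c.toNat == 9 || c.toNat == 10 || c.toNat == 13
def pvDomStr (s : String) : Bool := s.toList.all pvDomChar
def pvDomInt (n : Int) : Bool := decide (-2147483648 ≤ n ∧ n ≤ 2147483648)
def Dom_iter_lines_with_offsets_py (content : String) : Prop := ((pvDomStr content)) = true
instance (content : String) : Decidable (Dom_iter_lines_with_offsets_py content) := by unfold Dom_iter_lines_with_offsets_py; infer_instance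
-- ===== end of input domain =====

-- B computes the same (line, start, end) triples by splitting on '\n' once and
-- deriving the offsets arithmetically from the parts' lengths (objective: simpler).

-- ===== PORT A =====
-- loop body of A: on a newline, yield content[start:index] with its offsets and move start
def pvStepA (cs : List Char) (st : Int × List (String × Int × Int)) (p : Int × Char)
    : Int × List (String × Int × Int) :=
  if p.2 != '\n' then st
  else (p.1 + 1,
        st.2 ++ [(String.ofList (PySem.Chars.slice cs (some st.1) (some p.1)), st.1, p.1)])

def iter_lines_with_offsets_py (content : String) : List (String × Int × Int) :=
  let cs := content.toList
  let s := (PySem.List.enumerate cs 0).foldl (pvStepA cs) (0, [])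
  -- final: yield content[start:], start, len(content)
  s.2 ++ [(String.ofList (PySem.Chars.slice cs (some s.1) none), s.1, (cs.length : Int))]

-- ===== PORT B =====
-- loop body of B: end = start + len(part); yield; start = end + 1
def pvStepB (st : Int × List (String × Int × Int)) (part : List Char)
    : Int × List (String × Int × Int) :=
  let e := st.1 + (part.length : Int)
  (e + 1, st.2 ++ [(String.ofList part, st.1, e)])

def iter_lines_with_offsets_py_alt (content : String) : List (String × Int × Int) :=
  let parts := PySem.Chars.splitOn content.toList ['\n']
  ((parts.foldl pvStepB (0, [])).2)

-- ===== PRECONDITION & SPEC =====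
def Spec_iter_lines_with_offsets_py (content : String) (out : List (String × Int × Int)) : Prop := out = iter_lines_with_offsets_py_alt content
instance (content : String) (out : List (String × Int × Int)) : Decidable (Spec_iter_lines_with_offsets_py content out) := by unfold Spec_iter_lines_with_offsets_py; infer_instance

-- ===== CLAIM (what is proved, stated in full; the proofs are below) =====
def Claim_equal_iter_lines_with_offsets_py : Prop := ∀ (content : String), Dom_iter_lines_with_offsets_py content → Spec_iter_lines_with_offsets_py content (iter_lines_with_offsets_py content)

-- ===== LEMMAS AND PROOFS =====

-- reference splitter: split on '\n', with `pre` the consumed part of the current piece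
def mySplit (pre : List Char) : List Char → List (List Char)
  | [] => [pre]
  | c :: rest => if c = '\n' then pre :: mySplit [] rest else mySplit (pre ++ [c]) rest

lemma go_eq_mySplit (l : List Char) : ∀ (fuel : Nat), l.length < fuel →
    ∀ (cur : List Char) (acc : List (List Char)),
    PySem.Chars.splitOn.go ['\n'] fuel l cur acc
      = acc.reverse ++ mySplit cur.reverse l := by
  induction l with
  | nil =>
    intro fuel hf cur acc
    cases fuel with
    | zero => omega
    | succ f => simp [PySem.Chars.splitOn.go, mySplit]
  | cons c rest ih =>
    intro fuel hf cur acc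
    cases fuel with
    | zero => simp at hf
    | succ f =>
      by_cases hc : c = '\n'
      · subst hc
        have : List.isPrefixOf ['\n'] ('\n' :: rest) = true := by
          simp [List.isPrefixOf]
        simp only [PySem.Chars.splitOn.go, this, if_pos]
        have hd : List.drop ['\n'].length ('\n' :: rest) = rest := rfl
        rw [hd, ih f (by simpa using hf) [] (cur.reverse :: acc)]
        simp [mySplit]
      · have hpf : List.isPrefixOf ['\n'] (c :: rest) = false := by
          simp [List.isPrefixOf]; exact fun h => hc h.symm
        simp only [PySem.Chars.splitOn.go, hpf, Bool.false_eq_true, if_false]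
        rw [ih f (by simpa using hf) (c :: cur) acc]
        simp [mySplit, hc]

lemma splitOn_eq_mySplit (s : List Char) :
    PySem.Chars.splitOn s ['\n'] = mySplit [] s := by
  unfold PySem.Chars.splitOn
  rw [go_eq_mySplit s (s.length + 1) (by omega) [] []]
  simp

lemma main_invariant (full : List Char) : ∀ (cs pre : List Char) (start : Nat)
    (acc : List (String × Int × Int)),
    full.drop start = pre ++ cs →
    start + pre.length + cs.length = full.length →
    (let s := (PySem.List.enumerate cs ((start : Int) + pre.length)).foldl (pvStepA full) ((start : Int), acc)
     s.2 ++ [(String.ofList (PySem.Chars.slice full (some s.1) none), s.1, (full.length : Int))])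
      = ((mySplit pre cs).foldl pvStepB ((start : Int), acc)).2 := by
  intro cs
  induction cs with
  | nil =>
    intro pre start acc hdrop hlen
    simp only [PySem.List.enumerate_nil, List.foldl_nil, mySplit, List.foldl_cons, pvStepB]
    have hs : PySem.Chars.slice full (some (start : Int)) none = pre := by
      simp only [PySem.Chars.slice_eq_listSlice]
      rw [PySem.List.slice_from_natCast]
      simpa using hdrop
    have hl : (full.length : Int) = (start : Int) + pre.length := by
      simp at hlen; omega
    simp [hl, hdrop]
  | cons c rest ih =>
    intro pre start acc hdrop hlen
    rw [PySem.List.enumerate_cons]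
    by_cases hc : c = '\n'
    · subst hc
      simp only [List.foldl_cons, pvStepA, bne_self_eq_false, Bool.false_eq_true, if_false]
      have hslice : PySem.Chars.slice full (some (start : Int)) (some ((start : Int) + pre.length)) = pre := by
        simp only [PySem.Chars.slice_eq_listSlice]
        rw [PySem.List.slice_natCast_add]
        rw [hdrop]
        exact List.take_left' rfl
      have h1 : full.drop (start + pre.length) = '\n' :: rest := by
        rw [← List.drop_drop, hdrop]
        simp
      have hdrop' : full.drop (start + pre.length + 1) = rest := by
        rw [← List.drop_drop, h1]
        simp
      have hlen' : (start + pre.length + 1) + ([] : List Char).length + rest.length = full.length := by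
        simp at hlen ⊢; omega
      have := ih [] (start + pre.length + 1) (acc ++ [(String.ofList pre, (start : Int), (start : Int) + pre.length)]) (by simpa using hdrop') hlen'
      simp only [List.length_nil, Nat.cast_add, Nat.cast_one, Nat.cast_zero, add_zero] at this
      rw [show ((start : Int) + (pre.length : Int) + 1) = (((start + pre.length + 1 : Nat)) : Int) by push_cast; ring] at *
      simp only [hslice] at *
      rw [this]
      simp [mySplit, pvStepB]
    · simp only [List.foldl_cons, pvStepA,
        if_pos (by simp [bne, hc] : ((c != '\n')) = true)]
      have hdrop' : full.drop start = (pre ++ [c]) ++ rest := by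
        rw [hdrop]; simp
      have hlen' : start + (pre ++ [c]).length + rest.length = full.length := by
        simp at hlen ⊢; omega
      have := ih (pre ++ [c]) start acc hdrop' hlen'
      simp only [List.length_append, List.length_cons, List.length_nil] at this ⊢
      rw [show ((start : Int) + (pre.length : Int) + 1) = ((start : Int) + (((pre.length + (0+1)) : Nat) : Int)) by push_cast; ring]
      rw [this]
      simp [mySplit, hc]

-- ===== VERDICT (by name: the statement is the Claim_ definition above) =====
theorem iter_lines_with_offsets_py_spec : Claim_equal_iter_lines_with_offsets_py := by
  intro content _
  unfold Spec_iter_lines_with_offsets_py iter_lines_with_offsets_py iter_lines_with_offsets_py_alt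
  rw [splitOn_eq_mySplit]
  have := main_invariant content.toList content.toList [] 0 [] (by simp) (by simp)
  simpa using this
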